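-- pv_equiv track=rewrite | github.com/KamilDemel/LeetCode-Grind | LeetCode/1_off.py | solution
-- ===== SOURCE A (Python) =====
-- def solution(T):
--     if not T:
--         return 0
--
--     unique_sorted = sorted(list(set(T)))
--     ranks = {word: i + 1 for i, word in enumerate(unique_sorted)}
--
--     max_rank = len(unique_sorted)
--     bit = [0] * (max_rank + 1)
--
--     def add(idx, val):
--         while idx <= max_rank:
--             bit[idx] += val
--             idx += idx & (-idx)
--
--     def query(idx):
--         s = 0
--         while idx > 0:
--             s += bit[idx]
--             idx -= idx & (-idx)
--         return s
--
--     max_domi = 0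
--     for word in T:
--         rank = ranks[word]
--         count_smaller = query(rank - 1)
--         if count_smaller > max_domi:
--             max_domi = count_smaller
--         add(rank, 1)
--
--     return max_domi
-- ===== SOURCE B (Python) =====
-- def solution(T):
--     # Naive quadratic version: for each element, count the strictly smaller
--     # elements seen before it; keep the running maximum of these counts.
--     best = 0
--     prior = []
--     for x in T:
--         c = 0
--         for y in prior:
--             if y < x:
--                 c += 1
--         if c > best:
--             best = c
--         prior.append(x)
--     return best
-- ===== Notes on version B (the rewrite author's own statement) =====
-- stated objective: simpler
-- what changed: Replaces the coordinate-compression (sorted set + rank dict) and Fenwick/BIT prefix-count structure with two plain nested loops that directly count the strictly smaller prior elements for each position.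
import Mathlib
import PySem

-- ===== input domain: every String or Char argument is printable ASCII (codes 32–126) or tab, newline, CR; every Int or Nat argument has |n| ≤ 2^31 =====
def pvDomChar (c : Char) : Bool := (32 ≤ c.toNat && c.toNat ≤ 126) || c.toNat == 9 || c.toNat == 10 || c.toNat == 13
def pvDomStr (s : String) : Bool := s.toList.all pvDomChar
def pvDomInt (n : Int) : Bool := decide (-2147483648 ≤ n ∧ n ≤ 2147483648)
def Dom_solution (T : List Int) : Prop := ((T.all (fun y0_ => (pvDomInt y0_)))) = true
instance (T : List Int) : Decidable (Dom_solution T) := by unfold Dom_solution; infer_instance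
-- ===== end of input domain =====

-- B replaces A's coordinate compression + Fenwick tree by two plain nested loops
-- that count the strictly smaller prior elements directly (objective: simpler).

-- ===== PORT A =====
-- pvLb n = the lowest set bit of n (2-adic reference function used by the lemmas
-- below; the port itself computes it as Python does, via idx & (-idx)).
def pvLb (n : Nat) : Nat :=
  if _h : n = 0 then 0
  else if n % 2 = 1 then 1
  else 2 * pvLb (n / 2)
decreasing_by exact Nat.div_lt_self (Nat.pos_of_ne_zero _h) one_lt_two

theorem pvLb_odd (n : Nat) (h : n % 2 = 1) : pvLb n = 1 := by
  rw [pvLb]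
  have : n ≠ 0 := by omega
  simp [this, h]

theorem pvLb_even (n : Nat) (h : n % 2 = 0) (h0 : n ≠ 0) : pvLb n = 2 * pvLb (n / 2) := by
  rw [pvLb]; simp [h0, h]

theorem pvLb_pos (n : Nat) (h : 0 < n) : 0 < pvLb n := by
  induction n using Nat.strong_induction_on with
  | _ n ih =>
    rcases Nat.even_or_odd n with he | ho
    · have h2 : n % 2 = 0 := Nat.even_iff.mp he
      rw [pvLb_even n h2 (by omega)]
      have := ih (n / 2) (by omega) (by omega)
      omega
    · rw [pvLb_odd n (Nat.odd_iff.mp ho)]; omega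

theorem pvLb_le (n : Nat) : pvLb n ≤ n := by
  induction n using Nat.strong_induction_on with
  | _ n ih =>
    rcases Nat.eq_zero_or_pos n with h0 | h0
    · subst h0; rw [pvLb]; simp
    rcases Nat.even_or_odd n with he | ho
    · have h2 : n % 2 = 0 := Nat.even_iff.mp he
      rw [pvLb_even n h2 (by omega)]
      have := ih (n / 2) (by omega)
      omega
    · rw [pvLb_odd n (Nat.odd_iff.mp ho)]; omega

-- m & (m-1) clears the lowest set bit: m - (m &&& (m-1)) = pvLb m
theorem pvSubAnd (m : Nat) (h : 0 < m) : m - (m &&& (m - 1)) = pvLb m := by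
  induction m using Nat.strong_induction_on with
  | _ m ih =>
    rcases Nat.even_or_odd m with he | ho
    · obtain ⟨k, hk⟩ := he
      have hkpos : 0 < k := by omega
      have hm : m = 2 * k := by omega
      have hm1 : 2 * k - 1 = 2 * (k - 1) + 1 := by omega
      have hand : (2 * k) &&& (2 * (k - 1) + 1) = 2 * (k &&& (k - 1)) := by
        have := Nat.bitwise_bit (f := and) (a := false) (m := k) (b := true) (n := k - 1)
        simpa [Nat.bit, HAnd.hAnd, AndOp.and, Nat.land, Nat.mul_comm] using this
      have hle : k &&& (k - 1) ≤ k := Nat.and_le_left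
      rw [hm, hm1, hand, pvLb_even (2 * k) (by omega) (by omega)]
      have h2 : (2 * k) / 2 = k := by omega
      rw [h2, ← ih k (by omega) hkpos]
      omega
    · obtain ⟨k, hk⟩ := ho
      have hm1 : 2 * k + 1 - 1 = 2 * k := by omega
      have hand : (2 * k + 1) &&& (2 * k) = 2 * (k &&& k) := by
        have := Nat.bitwise_bit (f := and) (a := true) (m := k) (b := false) (n := k)
        simpa [Nat.bit, HAnd.hAnd, AndOp.and, Nat.land, Nat.mul_comm] using this
      rw [hk, hm1, hand, Nat.and_self, ← hk, pvLb_odd m (by omega)]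
      omega

-- Python's idx & (-idx) on a positive idx is the lowest set bit.
theorem pvLowbit_eq (n : Int) (h : 0 < n) : PySem.Int.band n (-n) = (pvLb n.toNat : Int) := by
  have h1 : ¬ (0 ≤ -n) := by omega
  have h2 : 0 ≤ n := by omega
  have h3 : (-(-n) - 1).toNat = n.toNat - 1 := by omega
  simp only [PySem.Int.band, if_pos h2, if_neg h1, h3]
  rw [pvSubAnd n.toNat (by omega)]

theorem pvLowbit_pos (n : Int) (h : 0 < n) : 0 < PySem.Int.band n (-n) := by
  rw [pvLowbit_eq n h]
  exact_mod_cast pvLb_pos n.toNat (by omega)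

theorem pvLowbit_le (n : Int) (h : 0 < n) : PySem.Int.band n (-n) ≤ n := by
  rw [pvLowbit_eq n h]
  have := pvLb_le n.toNat
  omega

-- query(idx): s accumulates bit[idx] while idx > 0, idx -= idx & (-idx)
def bitQuery (bit : List Int) (s : Int) (idx : Int) : Int :=
  if h : 0 < idx then
    bitQuery bit (s + PySem.List.pyGetD bit idx 0) (idx - PySem.Int.band idx (-idx))
  else s
termination_by idx.toNat
decreasing_by
  have h1 := pvLowbit_pos idx h
  have h2 := pvLowbit_le idx h
  omega

-- add(idx, val): while idx <= max_rank: bit[idx] += val; idx += idx & (-idx).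
-- ('0 < idx' only makes the loop total; idx is always ≥ 1 when called.
--  bit[idx] is ported with pyGetD / List.set: idx is always a valid index here.)
def bitAdd (maxRank : Int) (bit : List Int) (idx : Int) (val : Int) : List Int :=
  if h : 0 < idx ∧ idx ≤ maxRank then
    bitAdd maxRank (bit.set idx.toNat (PySem.List.pyGetD bit idx 0 + val))
      (idx + PySem.Int.band idx (-idx)) val
  else bit
termination_by (maxRank + 1 - idx).toNat
decreasing_by
  have h1 := pvLowbit_pos idx h.1
  omega

def solution (T : List Int) : Int :=
  if T = [] then 0
  else
    let uniqueSorted := PySem.List.sorted (PySem.Set.ofList T) (fun x => x) false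
    let ranks : PySem.Dict Int Int :=
      (PySem.List.enumerate uniqueSorted 0).foldl
        (fun d p => d.insert p.2 (p.1 + 1)) (PySem.Dict.mk [])
    let maxRank : Int := uniqueSorted.length
    let bit : List Int := List.replicate (maxRank.toNat + 1) 0
    let st := T.foldl (fun (s : List Int × Int) word =>
        let rank := ranks.getD word 0    -- ranks[word]: word ∈ T, so the key is always present
        let countSmaller := bitQuery s.1 0 (rank - 1)
        let maxDomi := if countSmaller > s.2 then countSmaller else s.2
        (bitAdd maxRank s.1 rank 1, maxDomi)) (bit, 0)
    st.2

-- ===== PORT B =====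
def solution_alt (T : List Int) : Int :=
  (T.foldl (fun (s : List Int × Int) x =>
      let c := s.1.foldl (fun acc y => if y < x then acc + 1 else acc) (0 : Int)
      (s.1 ++ [x], if c > s.2 then c else s.2)) (([] : List Int), (0 : Int))).2

-- ===== PRECONDITION & SPEC =====
def Spec_solution (T : List Int) (out : Int) : Prop := out = solution_alt T
instance (T : List Int) (out : Int) : Decidable (Spec_solution T out) := by unfold Spec_solution; infer_instance

-- ===== CLAIM (what is proved, stated in full; the proofs are below) =====
def Claim_equal_solution : Prop := ∀ (T : List Int), Dom_solution T → Spec_solution T (solution T)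

-- ===== LEMMAS AND PROOFS =====

theorem pvLb_add_self (n : Nat) : 0 < n → 2 * pvLb n ≤ pvLb (n + pvLb n) := by
  induction n using Nat.strong_induction_on with
  | _ n ih =>
    intro h
    rcases Nat.even_or_odd n with he | ho
    · obtain ⟨m, hm⟩ := he
      have hmpos : 0 < m := by omega
      have hn : n = 2 * m := by omega
      have hdiv : (2 * m) / 2 = m := by omega
      rw [hn, pvLb_even (2 * m) (by omega) (by omega), hdiv]
      have hsum : 2 * m + 2 * pvLb m = 2 * (m + pvLb m) := by ring
      have hpos := pvLb_pos m hmpos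
      have hdiv2 : (2 * (m + pvLb m)) / 2 = m + pvLb m := by omega
      rw [hsum, pvLb_even (2 * (m + pvLb m)) (by omega) (by omega), hdiv2]
      have := ih m (by omega) hmpos
      omega
    · have hno : n % 2 = 1 := Nat.odd_iff.mp ho
      rw [pvLb_odd n hno]
      have hev : (n + 1) % 2 = 0 := by omega
      rw [pvLb_even (n + 1) hev (by omega)]
      have := pvLb_pos ((n + 1) / 2) (by omega)
      omega

theorem pvLb_add_of_lt (r : Nat) : ∀ t : Nat, 0 < t → t < pvLb r → pvLb (r + t) = pvLb t := by
  induction r using Nat.strong_induction_on with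
  | _ r ih =>
    intro t h0 ht
    rcases Nat.eq_zero_or_pos r with hr0 | hr0
    · subst hr0
      rw [pvLb] at ht
      simp at ht
    rcases Nat.even_or_odd r with he | ho
    · obtain ⟨m, hm⟩ := he
      have hr : r = 2 * m := by omega
      have hmpos : 0 < m := by omega
      have hlb : pvLb r = 2 * pvLb m := by
        have hdiv : (2 * m) / 2 = m := by omega
        rw [hr, pvLb_even (2 * m) (by omega) (by omega), hdiv]
      rcases Nat.even_or_odd t with te | todd
      · obtain ⟨s, hs⟩ := te
        have htt : t = 2 * s := by omega
        have hspos : 0 < s := by omega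
        have hslt : s < pvLb m := by omega
        have h1 : r + t = 2 * (m + s) := by omega
        have hdiv : (2 * (m + s)) / 2 = m + s := by omega
        rw [h1, pvLb_even (2 * (m + s)) (by omega) (by omega), hdiv,
          ih m (by omega) s hspos hslt, htt]
        have hdiv2 : (2 * s) / 2 = s := by omega
        rw [pvLb_even (2 * s) (by omega) (by omega), hdiv2]
      · have ht2 : t % 2 = 1 := Nat.odd_iff.mp todd
        have h1 : (r + t) % 2 = 1 := by omega
        rw [pvLb_odd (r + t) h1, pvLb_odd t ht2]
    · rw [pvLb_odd r (Nat.odd_iff.mp ho)] at ht; omega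

def pvS (f : Nat → Int) (a b : Nat) : Int := ∑ j ∈ Finset.Ioc a b, f j

def pvInv (bit : List Int) (maxR : Nat) (f : Nat → Int) : Prop :=
  bit.length = maxR + 1 ∧ ∀ i : Nat, 1 ≤ i → i ≤ maxR → bit.getD i 0 = pvS f (i - pvLb i) i

theorem pvQuery_eq (bit : List Int) (maxR : Nat) (f : Nat → Int)
    (hInv : pvInv bit maxR f) :
    ∀ i : Nat, i ≤ maxR → ∀ s : Int, bitQuery bit s (i : Int) = s + pvS f 0 i := by
  intro i
  induction i using Nat.strong_induction_on with
  | _ i ih =>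
    intro hi s
    rcases Nat.eq_zero_or_pos i with h0 | h0
    · subst h0
      rw [bitQuery]
      simp [pvS]
    · have hpos : (0 : Int) < (i : Int) := by exact_mod_cast h0
      rw [bitQuery, dif_pos hpos, pvLowbit_eq _ hpos]
      have htn : ((i : Int)).toNat = i := by omega
      rw [htn]
      have hle := pvLb_le i
      have hp := pvLb_pos i h0
      have hcast : (i : Int) - (pvLb i : Int) = ((i - pvLb i : Nat) : Int) := by omega
      rw [hcast, ih (i - pvLb i) (by omega) (by omega)]
      have hget : PySem.List.pyGetD bit (i : Int) 0 = bit.getD i 0 := by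
        simpa using PySem.List.pyGetD_natCast bit i 0
      rw [hget, hInv.2 i h0 hi]
      have hsplit : pvS f 0 (i - pvLb i) + pvS f (i - pvLb i) i = pvS f 0 i :=
        Finset.sum_Ioc_consecutive f (by omega) (by omega)
      rw [← hsplit]
      ring

theorem pvAdd_path (maxR : Nat) (f : Nat → Int) (r : Nat) (hr : 1 ≤ r) :
    ∀ (k c : Nat) (bit : List Int), maxR + 1 - c = k → r ≤ c → c - pvLb c < r →
    bit.length = maxR + 1 →
    (∀ i : Nat, 1 ≤ i → i ≤ maxR →
      bit.getD i 0 = pvS f (i - pvLb i) i + (if i - pvLb i < r ∧ r ≤ i ∧ i < c then 1 else 0)) →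
    (bitAdd (maxR : Int) bit (c : Int) 1).length = maxR + 1 ∧
    ∀ i : Nat, 1 ≤ i → i ≤ maxR →
      (bitAdd (maxR : Int) bit (c : Int) 1).getD i 0
        = pvS f (i - pvLb i) i + (if i - pvLb i < r ∧ r ≤ i then 1 else 0) := by
  intro k
  induction k using Nat.strong_induction_on with
  | _ k ih =>
    intro c bit hk hc hcr hlen hbit
    by_cases hcm : c ≤ maxR
    · have hcpos : 0 < c := by omega
      have hpos : (0 : Int) < (c : Int) := by exact_mod_cast hcpos
      have hcond : 0 < (c : Int) ∧ (c : Int) ≤ ((maxR : Nat) : Int) := ⟨hpos, by exact_mod_cast hcm⟩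
      rw [bitAdd, dif_pos hcond, pvLowbit_eq _ hpos]
      have htn : ((c : Int)).toNat = c := by omega
      have hstep : (c : Int) + ((pvLb c : Nat) : Int) = ((c + pvLb c : Nat) : Int) := by push_cast; ring
      rw [htn, hstep]
      have hlbp := pvLb_pos c hcpos
      have hlble := pvLb_le c
      have hlb2 := pvLb_add_self c hcpos
      have hclen : c < bit.length := by omega
      set v := PySem.List.pyGetD bit (c : Int) 0 + 1 with hv
      have hget : PySem.List.pyGetD bit (c : Int) 0 = bit.getD c 0 := by
        simpa using PySem.List.pyGetD_natCast bit c 0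
      refine ih (maxR + 1 - (c + pvLb c)) (by omega) (c + pvLb c) _ rfl (by omega) (by omega)
        (by simpa using hlen) ?_
      intro i hi1 hi2
      by_cases hic : i = c
      · subst hic
        have : (bit.set i v).getD i 0 = v := by
          simp [List.getD, List.getElem?_set_self hclen]
        rw [this, hv, hget, hbit i hi1 hi2]
        have hcondold : ¬ (i - pvLb i < r ∧ r ≤ i ∧ i < i) := by omega
        have hcondnew : i - pvLb i < r ∧ r ≤ i ∧ i < i + pvLb i := ⟨hcr, hc, by omega⟩
        rw [if_neg hcondold, if_pos hcondnew]
        ring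
      · have : (bit.set c v).getD i 0 = bit.getD i 0 := by
          simp [List.getD, List.getElem?_set_ne (fun h => hic h.symm)]
        rw [this, hbit i hi1 hi2]
        congr 1
        by_cases hlt : i < c
        · have h1 : (i - pvLb i < r ∧ r ≤ i ∧ i < c) ↔ (i - pvLb i < r ∧ r ≤ i ∧ i < c + pvLb c) := by
            constructor <;> intro h <;> exact ⟨h.1, h.2.1, by omega⟩
          simp only [h1]
        · by_cases hup : i < c + pvLb c
          · -- c < i < c + pvLb c: i does not contain r
            have htpos : 0 < i - c := by omega
            have htlt : i - c < pvLb c := by omega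
            have hlbi : pvLb i = pvLb (i - c) := by
              have := pvLb_add_of_lt c (i - c) htpos htlt
              rw [← this]
              congr 1
              omega
            have hlbt := pvLb_le (i - c)
            have hnot : ¬ (i - pvLb i < r) := by omega
            have ho : ¬ (i - pvLb i < r ∧ r ≤ i ∧ i < c) := fun h => hnot h.1
            have hn : ¬ (i - pvLb i < r ∧ r ≤ i ∧ i < c + pvLb c) := fun h => hnot h.1
            rw [if_neg ho, if_neg hn]
          · have ho : ¬ (i - pvLb i < r ∧ r ≤ i ∧ i < c) := by omega
            have hn : ¬ (i - pvLb i < r ∧ r ≤ i ∧ i < c + pvLb c) := by omega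
            rw [if_neg ho, if_neg hn]
    · have hcond : ¬ (0 < (c : Int) ∧ (c : Int) ≤ ((maxR : Nat) : Int)) := by
        intro h
        have : c ≤ maxR := by exact_mod_cast h.2
        omega
      rw [bitAdd, dif_neg hcond]
      refine ⟨hlen, ?_⟩
      intro i hi1 hi2
      rw [hbit i hi1 hi2]
      congr 1
      by_cases hnew : i - pvLb i < r ∧ r ≤ i
      · rw [if_pos ⟨hnew.1, hnew.2, by omega⟩, if_pos hnew]
      · have ho : ¬ (i - pvLb i < r ∧ r ≤ i ∧ i < c) := fun h => hnew ⟨h.1, h.2.1⟩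
        rw [if_neg ho, if_neg hnew]

theorem pvS_bump (f : Nat → Int) (r a b : Nat) :
    pvS (fun j => if j = r then f j + 1 else f j) a b
      = pvS f a b + (if a < r ∧ r ≤ b then 1 else 0) := by
  unfold pvS
  have h1 : ∀ j : Nat, (if j = r then f j + 1 else f j) = f j + (if j = r then 1 else 0) := by
    intro j; by_cases h : j = r <;> simp [h]
  simp only [h1]
  rw [Finset.sum_add_distrib, Finset.sum_ite_eq' (Finset.Ioc a b) r (fun _ => (1 : Int))]
  simp only [Finset.mem_Ioc]

theorem pvAdd_inv (bit : List Int) (maxR : Nat) (f : Nat → Int) (r : Nat)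
    (hInv : pvInv bit maxR f) (hr1 : 1 ≤ r) (hr2 : r ≤ maxR) :
    pvInv (bitAdd (maxR : Int) bit (r : Int) 1) maxR
      (fun j => if j = r then f j + 1 else f j) := by
  have h := pvAdd_path maxR f r hr1 (maxR + 1 - r) r bit rfl (le_refl r)
    (by have := pvLb_pos r (by omega); omega) hInv.1 ?_
  · refine ⟨h.1, ?_⟩
    intro i hi1 hi2
    rw [h.2 i hi1 hi2, pvS_bump]
  · intro i hi1 hi2
    rw [hInv.2 i hi1 hi2, if_neg (by omega : ¬ (i - pvLb i < r ∧ r ≤ i ∧ i < r))]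
    ring

theorem pvIdxOf_lt_iff (us : List Int) (hpw : us.Pairwise (· < ·))
    {x y : Int} (hx : x ∈ us) (hy : y ∈ us) : us.idxOf x < us.idxOf y ↔ x < y := by
  have hgl := List.pairwise_iff_getElem.mp hpw
  have hix := List.idxOf_lt_length_of_mem hx
  have hiy := List.idxOf_lt_length_of_mem hy
  have hgx : us[us.idxOf x] = x := List.getElem_idxOf hix
  have hgy : us[us.idxOf y] = y := List.getElem_idxOf hiy
  constructor
  · intro h
    have := hgl (us.idxOf x) (us.idxOf y) hix hiy h
    rwa [hgx, hgy] at this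
  · intro h
    rcases lt_trichotomy (us.idxOf x) (us.idxOf y) with hlt | heq | hgt
    · exact hlt
    · exfalso
      have h2 : us[us.idxOf x] = us[us.idxOf y] := by
        congr 1
      rw [hgx, hgy] at h2
      rw [h2] at h
      exact lt_irrefl _ h
    · exfalso
      have := hgl (us.idxOf y) (us.idxOf x) hiy hix hgt
      rw [hgx, hgy] at this
      exact lt_irrefl _ (h.trans this)

def pvFreq (us p : List Int) (j : Nat) : Int :=
  ((p.filter (fun x => us.idxOf x + 1 = j)).length : Int)

theorem pvSum_freq (us : List Int) (s : Finset Nat) (p : List Int) :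
    ∑ j ∈ s, pvFreq us p j = ((p.filter (fun x => us.idxOf x + 1 ∈ s)).length : Int) := by
  induction p with
  | nil => simp [pvFreq]
  | cons x p ihp =>
    have hstep : ∀ j, pvFreq us (x :: p) j = pvFreq us p j + (if us.idxOf x + 1 = j then 1 else 0) := by
      intro j
      unfold pvFreq
      by_cases h : us.idxOf x + 1 = j <;> simp [h] <;> push_cast <;> ring
    simp only [hstep]
    rw [Finset.sum_add_distrib, ihp, Finset.sum_ite_eq s (us.idxOf x + 1) (fun _ => (1 : Int))]
    by_cases hmem : us.idxOf x + 1 ∈ s <;> simp [hmem] <;> push_cast <;> ring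

theorem pvFreq_append (us p : List Int) (w : Int) :
    pvFreq us (p ++ [w]) = fun j => if j = us.idxOf w + 1 then pvFreq us p j + 1 else pvFreq us p j := by
  funext j
  unfold pvFreq
  rw [List.filter_append]
  by_cases h : us.idxOf w + 1 = j
  · rw [if_pos h.symm]
    simp [h]
  · rw [if_neg (fun hh => h hh.symm)]
    simp [h]

theorem pvRanks_getD_notmem (us : List Int) (w : Int) (hw : w ∉ us) :
    ∀ (start : Int) (d : PySem.Dict Int Int),
      ((PySem.List.enumerate us start).foldl (fun d p => d.insert p.2 (p.1 + 1)) d).getD w 0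
        = d.getD w 0 := by
  induction us with
  | nil => intro start d; simp [PySem.List.enumerate_nil]
  | cons a rest ih =>
    intro start d
    rw [PySem.List.enumerate_cons, List.foldl_cons,
      ih (fun h => hw (List.mem_cons_of_mem a h)) (start + 1)]
    refine PySem.Dict.getD_insert_of_ne d (start + 1) 0 ?_
    intro h
    subst h
    exact hw List.mem_cons_self

theorem pvRanks_getD (us : List Int) (hnd : us.Nodup) (w : Int) (hw : w ∈ us) :
    ∀ (start : Int) (d : PySem.Dict Int Int),
      ((PySem.List.enumerate us start).foldl (fun d p => d.insert p.2 (p.1 + 1)) d).getD w 0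
        = start + us.idxOf w + 1 := by
  induction us with
  | nil => cases hw
  | cons a rest ih =>
    intro start d
    rw [PySem.List.enumerate_cons, List.foldl_cons]
    by_cases hwa : w = a
    · subst hwa
      have hnr : w ∉ rest := (List.nodup_cons.mp hnd).1
      rw [pvRanks_getD_notmem rest w hnr (start + 1), PySem.Dict.getD_insert_self]
      simp [List.idxOf_cons_self]
    · have hwr : w ∈ rest := List.mem_of_ne_of_mem hwa hw
      rw [ih (List.nodup_cons.mp hnd).2 hwr (start + 1)]
      rw [List.idxOf_cons_ne rest (fun h => hwa h.symm)]
      push_cast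
      ring

theorem pvInv_init (us : List Int) :
    pvInv (List.replicate (((us.length : Int)).toNat + 1) 0) us.length (pvFreq us []) := by
  constructor
  · simp
  · intro i hi1 hi2
    have hfreq : ∀ j, pvFreq us [] j = 0 := by intro j; simp [pvFreq]
    have hS : pvS (pvFreq us []) (i - pvLb i) i = 0 := by
      unfold pvS
      simp [hfreq]
    rw [hS]
    simp only [List.getD, List.getElem?_replicate]
    split <;> rfl

theorem pvLoop (us : List Int) (hpw : us.Pairwise (· < ·))
    (ranks : PySem.Dict Int Int)
    (hrk : ∀ w ∈ us, ranks.getD w 0 = (us.idxOf w : Int) + 1) :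
    ∀ (rest prior : List Int), (∀ x ∈ rest, x ∈ us) → (∀ x ∈ prior, x ∈ us) →
    ∀ (bit : List Int) (maxd : Int), pvInv bit us.length (pvFreq us prior) →
    (rest.foldl (fun (s : List Int × Int) word =>
        let rank := ranks.getD word 0
        let countSmaller := bitQuery s.1 0 (rank - 1)
        let maxDomi := if countSmaller > s.2 then countSmaller else s.2
        (bitAdd ((us.length : Int)) s.1 rank 1, maxDomi)) (bit, maxd)).2
    = (rest.foldl (fun (s : List Int × Int) x =>
        let c := s.1.foldl (fun acc y => if y < x then acc + 1 else acc) (0 : Int)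
        (s.1 ++ [x], if c > s.2 then c else s.2)) (prior, maxd)).2 := by
  intro rest
  induction rest with
  | nil => intro prior _ _ bit maxd _; rfl
  | cons word rest ih =>
    intro prior hrest hprior bit maxd hInv
    have hwus : word ∈ us := hrest word List.mem_cons_self
    have hix : us.idxOf word < us.length := List.idxOf_lt_length_of_mem hwus
    rw [List.foldl_cons, List.foldl_cons]
    simp only []
    have hrank : ranks.getD word 0 = ((us.idxOf word : Nat) : Int) + 1 := hrk word hwus
    -- the count computed by A's query equals B's naive count
    have hm1 : ranks.getD word 0 - 1 = ((us.idxOf word : Nat) : Int) := by rw [hrank]; ring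
    have hq := pvQuery_eq bit us.length (pvFreq us prior) hInv (us.idxOf word) (le_of_lt hix) 0
    have hcount : bitQuery bit 0 (ranks.getD word 0 - 1)
        = prior.foldl (fun acc y => if y < word then acc + 1 else acc) (0 : Int) := by
      rw [hm1, hq, PySem.List.foldl_ite_add_one (fun y => y < word) prior 0]
      rw [pvS, pvSum_freq us (Finset.Ioc 0 (us.idxOf word)) prior]
      rw [List.countP_eq_length_filter]
      have hfc : List.filter (fun x => decide (us.idxOf x + 1 ∈ Finset.Ioc 0 (us.idxOf word))) prior
          = List.filter (fun x => decide (x < word)) prior := by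
        apply List.filter_congr
        intro x hx
        have hxus : x ∈ us := hprior x hx
        have : (us.idxOf x + 1 ∈ Finset.Ioc 0 (us.idxOf word)) ↔ (x < word) := by
          rw [Finset.mem_Ioc]
          rw [← pvIdxOf_lt_iff us hpw hxus hwus]
          omega
        simp [this]
      rw [hfc]
    rw [hcount]
    -- the new Fenwick state represents the new prefix
    have hr1 : 1 ≤ us.idxOf word + 1 := by omega
    have hr2 : us.idxOf word + 1 ≤ us.length := by omega
    have hAdd := pvAdd_inv bit us.length (pvFreq us prior) (us.idxOf word + 1) hInv hr1 hr2
    have hcast : ranks.getD word 0 = ((us.idxOf word + 1 : Nat) : Int) := by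
      rw [hrank]; push_cast; ring
    have hInv' : pvInv (bitAdd ((us.length : Int)) bit (ranks.getD word 0) 1) us.length
        (pvFreq us (prior ++ [word])) := by
      rw [hcast, pvFreq_append]
      exact hAdd
    exact ih (prior ++ [word]) (fun x hx => hrest x (List.mem_cons_of_mem word hx))
      (fun x hx => by
        rcases List.mem_append.mp hx with h | h
        · exact hprior x h
        · rw [List.mem_singleton.mp h]; exact hwus)
      _ _ hInv'

-- ===== VERDICT (by name: the statement is the Claim_ definition above) =====
theorem solution_spec : Claim_equal_solution := by
  intro T _hdom
  unfold Spec_solution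
  by_cases hT : T = []
  · subst hT; rfl
  · have hus := PySem.List.sorted_ofList_pairwise_lt (xs := T)
    set us := PySem.List.sorted (PySem.Set.ofList T) (fun x => x) false with hus_def
    have hnd : us.Nodup := hus.imp ne_of_lt
    have hmem : ∀ x ∈ T, x ∈ us := by
      intro x hx
      rw [hus_def, PySem.List.mem_sorted, PySem.Set.mem_ofList]
      exact hx
    have hrk : ∀ w ∈ us,
        (((PySem.List.enumerate us 0).foldl (fun d p => d.insert p.2 (p.1 + 1))
          (PySem.Dict.mk [])).getD w 0) = (us.idxOf w : Int) + 1 := by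
      intro w hw
      rw [pvRanks_getD us hnd w hw 0 (PySem.Dict.mk [])]
      ring
    have h := pvLoop us hus _ hrk T [] hmem (by simp)
      (List.replicate (((us.length : Int)).toNat + 1) 0) 0 (pvInv_init us)
    simp only [solution, if_neg hT]
    exact h
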